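-- pv_equiv track=rewrite | github.com/liyannnw/vec2seq | VectorDecoder/similarity.py | similarity_with_penalty
-- ===== SOURCE A (Python) =====
-- def similarity_with_penalty(s1, s2):
--     array = [[0 for _ in range(len(s2) + 1)] for _ in range(len(s1) + 1)]
--     for i1 in range(0, len(s1)):
--         for i2 in range(0, len(s2)):
--             if s1[i1] == s2[i2]:
--                 if 0 == i1 or 0 == i2 or s1[i1 - 1] == s2[i2 - 1]:
--                     r = 2
--                     if 0 != i1 and 0 != i2:
--                         array[i1 - 1][i2 - 1] += 1
--                 else:
--                     r = 1
--             else: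
--                 r = 0
--             array[i1 + 1][i2 + 1] = max(array[i1][i2] + r, array[i1 + 1][i2], array[i1][i2 + 1])
--     return array[len(s1)][len(s2)]
-- ===== SOURCE B (Python) =====
-- def similarity_with_penalty(s1, s2):
--     # Top-down memoized recursion: f(i, j) = best score aligning the prefixes
--     # s1[:i] and s2[:j]; A's dead in-place bonus increment is dropped (the
--     # incremented cell is never read again).
--     n, m = len(s1), len(s2)
--     memo = [[None] * (m + 1) for _ in range(n + 1)]
--
--     def weight(a, b):
--         if s1[a] != s2[b]:
--             return 0
--         if a == 0 or b == 0 or s1[a - 1] == s2[b - 1]: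
--             return 2
--         return 1
--
--     def f(i, j):
--         if i == 0 or j == 0:
--             return 0
--         v = memo[i][j]
--         if v is None:
--             v = max(f(i - 1, j - 1) + weight(i - 1, j - 1), f(i - 1, j), f(i, j - 1))
--             memo[i][j] = v
--         return v
--
--     return f(n, m)
-- ===== Notes on version B (the rewrite author's own statement) =====
-- stated objective: alternative
-- what changed: B replaces A's iterative bottom-up matrix fill (with its dead in-place bonus increment, which is never read again) by a top-down memoized recursion f(i,j) over prefix pairs with a separate weight helper; iteration becomes recursion on demand.
import Mathlib
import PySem

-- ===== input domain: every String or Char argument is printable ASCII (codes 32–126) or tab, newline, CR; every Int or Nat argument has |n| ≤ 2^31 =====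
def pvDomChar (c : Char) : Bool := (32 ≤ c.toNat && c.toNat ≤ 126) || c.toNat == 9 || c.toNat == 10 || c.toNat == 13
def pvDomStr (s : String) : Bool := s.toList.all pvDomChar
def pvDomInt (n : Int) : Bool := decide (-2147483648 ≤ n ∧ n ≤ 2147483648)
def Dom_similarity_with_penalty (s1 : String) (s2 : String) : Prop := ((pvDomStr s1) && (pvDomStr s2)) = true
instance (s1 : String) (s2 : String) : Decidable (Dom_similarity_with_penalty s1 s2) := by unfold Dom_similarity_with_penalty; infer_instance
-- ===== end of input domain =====

-- B replaces A's bottom-up matrix fill (whose in-place bonus increment is dead code) by a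
-- top-down memoized recursion over prefix pairs; return value proved equal on all inputs.

-- ===== PORT A =====
-- all of A's list/string accesses are at provably in-range non-negative indices, so getD-based helpers are exact
def pvGetC (l : List Char) (i : Nat) : Char := l.getD i ' '
def pvGet2 (a : List (List Int)) (i j : Nat) : Int := (a.getD i []).getD j 0
def pvSet2 (a : List (List Int)) (i j : Nat) (v : Int) : List (List Int) := a.set i ((a.getD i []).set j v)

-- body of A's inner loop, step for step (the dead `array[i1-1][i2-1] += 1` included)
def simA_step (l1 l2 : List Char) (i1 i2 : Nat) (a : List (List Int)) : List (List Int) :=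
  let p : List (List Int) × Int :=
    if pvGetC l1 i1 = pvGetC l2 i2 then
      if i1 = 0 ∨ i2 = 0 ∨ pvGetC l1 (i1 - 1) = pvGetC l2 (i2 - 1) then
        ((if i1 ≠ 0 ∧ i2 ≠ 0 then pvSet2 a (i1 - 1) (i2 - 1) (pvGet2 a (i1 - 1) (i2 - 1) + 1) else a), 2)
      else (a, 1)
    else (a, 0)
  pvSet2 p.1 (i1 + 1) (i2 + 1)
    (max (pvGet2 p.1 i1 i2 + p.2) (max (pvGet2 p.1 (i1 + 1) i2) (pvGet2 p.1 i1 (i2 + 1))))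

def similarity_with_penalty (s1 : String) (s2 : String) : Int :=
  let l1 := s1.toList
  let l2 := s2.toList
  let a0 := List.replicate (l1.length + 1) (List.replicate (l2.length + 1) (0 : Int))
  let afin := (List.range l1.length).foldl
    (fun a i1 => (List.range l2.length).foldl (fun a i2 => simA_step l1 l2 i1 i2 a) a) a0
  pvGet2 afin l1.length l2.length

-- ===== PORT B =====
-- memo[i][j] reads/writes are always at in-range non-negative indices, so getD/set helpers are exact
def pvGetM (memo : List (List (Option Int))) (i j : Nat) : Option Int := (memo.getD i []).getD j none
def pvSetM (memo : List (List (Option Int))) (i j : Nat) (v : Int) : List (List (Option Int)) :=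
  memo.set i ((memo.getD i []).set j (some v))

-- B's `weight(a, b)` helper
def wB (l1 l2 : List Char) (a b : Nat) : Int :=
  if pvGetC l1 a = pvGetC l2 b then
    if a = 0 ∨ b = 0 ∨ pvGetC l1 (a - 1) = pvGetC l2 (b - 1) then 2 else 1
  else 0

-- B's memoized recursion `f(i, j)`, threading the memo table
def fB (l1 l2 : List Char) : Nat → Nat → List (List (Option Int)) → Int × List (List (Option Int))
  | 0, _, memo => (0, memo)
  | _ + 1, 0, memo => (0, memo)
  | i + 1, j + 1, memo =>
    match pvGetM memo (i + 1) (j + 1) with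
    | some v => (v, memo)
    | none =>
      let d := fB l1 l2 i j memo
      let u := fB l1 l2 i (j + 1) d.2
      let lft := fB l1 l2 (i + 1) j u.2
      let v := max (d.1 + wB l1 l2 i j) (max u.1 lft.1)
      (v, pvSetM lft.2 (i + 1) (j + 1) v)
  termination_by i j _ => (i, j)

def similarity_with_penalty_alt (s1 : String) (s2 : String) : Int :=
  let l1 := s1.toList
  let l2 := s2.toList
  let memo0 := List.replicate (l1.length + 1) (List.replicate (l2.length + 1) (none : Option Int))
  (fB l1 l2 l1.length l2.length memo0).1

-- ===== PRECONDITION & SPEC =====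
def Spec_similarity_with_penalty (s1 : String) (s2 : String) (out : Int) : Prop := out = similarity_with_penalty_alt s1 s2
instance (s1 : String) (s2 : String) (out : Int) : Decidable (Spec_similarity_with_penalty s1 s2 out) := by unfold Spec_similarity_with_penalty; infer_instance

-- ===== CLAIM (what is proved, stated in full; the proofs are below) =====
def Claim_equal_similarity_with_penalty : Prop := ∀ (s1 : String) (s2 : String), Dom_similarity_with_penalty s1 s2 → Spec_similarity_with_penalty s1 s2 (similarity_with_penalty s1 s2)

-- ===== LEMMAS AND PROOFS =====

-- the pure (memo-free) value of B's recursion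
def gpure (l1 l2 : List Char) : Nat → Nat → Int
  | 0, _ => 0
  | _ + 1, 0 => 0
  | i + 1, j + 1 =>
    max (gpure l1 l2 i j + wB l1 l2 i j) (max (gpure l1 l2 i (j + 1)) (gpure l1 l2 (i + 1) j))
  termination_by i j => (i, j)

-- proof-side mirror of the shared DP recurrence (row-by-row form, used for A)
def bStep (l1 l2 : List Char) (i : Nat) (prev : List Int) (cur : List Int) (j : Nat) : List Int :=
  cur ++ [max (prev.getD j 0 + wB l1 l2 i j) (max (cur.getD j 0) (prev.getD (j + 1) 0))]

def prefB (l1 l2 : List Char) (i : Nat) (prev : List Int) (j : Nat) : List Int :=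
  (List.range j).foldl (bStep l1 l2 i prev) [0]

def rowB (l1 l2 : List Char) : Nat → List Int
  | 0 => List.replicate (l2.length + 1) 0
  | i + 1 => prefB l1 l2 i (rowB l1 l2 i) l2.length

lemma prefB_succ (l1 l2 : List Char) (i : Nat) (prev : List Int) (j : Nat) :
    prefB l1 l2 i prev (j + 1) = bStep l1 l2 i prev (prefB l1 l2 i prev j) j := by
  simp [prefB, List.range_succ]

lemma prefB_length (l1 l2 : List Char) (i : Nat) (prev : List Int) (j : Nat) :
    (prefB l1 l2 i prev j).length = j + 1 := by
  induction j with
  | zero => simp [prefB]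
  | succ j ih => rw [prefB_succ]; simp [bStep, ih]

lemma pv_getD_set_ne {α : Type} (a : List α) (k k' : Nat) (r d : α) (h : k' ≠ k) :
    (a.set k r).getD k' d = a.getD k' d := by
  simp [List.getD, Ne.symm h]

lemma pv_getD_set_self {α : Type} (a : List α) (k : Nat) (r d : α) (h : k < a.length) :
    (a.set k r).getD k d = r := by
  simp [List.getD, h]

lemma pv_getD_append_left (xs ys : List Int) (j : Nat) (h : j < xs.length) :
    (xs ++ ys).getD j 0 = xs.getD j 0 := by
  simp [List.getD, List.getElem?_append_left h]

-- the invariant carried through A's inner loop over row i1 = i, after j inner steps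
def InvA (l1 l2 : List Char) (i j : Nat) (a : List (List Int)) : Prop :=
  a.length = l1.length + 1 ∧
  (∀ c, j ≤ c + 1 → (a.getD i []).getD c 0 = (rowB l1 l2 i).getD c 0) ∧
  a.getD (i + 1) [] = prefB l1 l2 i (rowB l1 l2 i) j ++ List.replicate (l2.length - j) 0 ∧
  (∀ k, i + 1 < k → k ≤ l1.length → a.getD k [] = List.replicate (l2.length + 1) 0)

-- the final write of A's inner body preserves the invariant (b = matrix after the dead increment)
lemma writeA (l1 l2 : List Char) (i j : Nat) (hi : i < l1.length) (hj : j < l2.length)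
    (b : List (List Int)) (hb : InvA l1 l2 i j b) (r : Int) (hr : r = wB l1 l2 i j) :
    InvA l1 l2 i (j + 1)
      (pvSet2 b (i + 1) (j + 1)
        (max (pvGet2 b i j + r) (max (pvGet2 b (i + 1) j) (pvGet2 b i (j + 1))))) := by
  obtain ⟨hlen, hrow, hnext, hzero⟩ := hb
  have hplen : (prefB l1 l2 i (rowB l1 l2 i) j).length = j + 1 := prefB_length _ _ _ _ _
  have hv : max (pvGet2 b i j + r) (max (pvGet2 b (i + 1) j) (pvGet2 b i (j + 1)))
      = max ((rowB l1 l2 i).getD j 0 + wB l1 l2 i j)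
          (max ((prefB l1 l2 i (rowB l1 l2 i) j).getD j 0) ((rowB l1 l2 i).getD (j + 1) 0)) := by
    unfold pvGet2
    rw [hrow j (by omega), hrow (j + 1) (by omega), hnext, hr,
      pv_getD_append_left _ _ _ (by omega)]
  refine ⟨?_, ?_, ?_, ?_⟩
  · simp [pvSet2, hlen]
  · intro c hc
    rw [pvSet2, pv_getD_set_ne _ _ _ _ _ (by omega)]
    exact hrow c (by omega)
  · rw [pvSet2, pv_getD_set_self _ _ _ _ (by omega), hnext, hv,
      List.set_append_right _ _ (by omega)]
    have h0 : j + 1 - (prefB l1 l2 i (rowB l1 l2 i) j).length = 0 := by omega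
    have hm : l2.length - j = (l2.length - (j + 1)) + 1 := by omega
    rw [h0, hm, List.replicate_succ, List.set_cons_zero, prefB_succ]
    simp [bStep]
  · intro k hk hk'
    rw [pvSet2, pv_getD_set_ne _ _ _ _ _ (by omega)]
    exact hzero k hk hk'

lemma stepA_inv (l1 l2 : List Char) (i j : Nat) (hi : i < l1.length) (hj : j < l2.length)
    (a : List (List Int)) (ha : InvA l1 l2 i j a) :
    InvA l1 l2 i (j + 1) (simA_step l1 l2 i j a) := by
  unfold simA_step
  split_ifs with h1 h2 h3
  all_goals simp only []
  -- branch with the dead increment: it touches only row i-1, which the invariant ignores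
  · refine writeA l1 l2 i j hi hj _ ?_ 2 ?_
    · obtain ⟨hlen, hrow, hnext, hzero⟩ := ha
      have hi1 : 1 ≤ i := Nat.one_le_iff_ne_zero.mpr h3.1
      refine ⟨by simp [pvSet2, hlen], ?_, ?_, ?_⟩
      · intro c hc
        rw [pvSet2, pv_getD_set_ne _ _ _ _ _ (by omega)]
        exact hrow c hc
      · rw [pvSet2, pv_getD_set_ne _ _ _ _ _ (by omega)]
        exact hnext
      · intro k hk hk'
        rw [pvSet2, pv_getD_set_ne _ _ _ _ _ (by omega)]
        exact hzero k hk hk'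
    · simp [wB, h1, h2]
  · exact writeA l1 l2 i j hi hj _ ha 2 (by simp [wB, h1, h2])
  · exact writeA l1 l2 i j hi hj _ ha 1 (by simp [wB, h1, h2])
  · exact writeA l1 l2 i j hi hj _ ha 0 (by simp [wB, h1])

lemma innerA_fold (l1 l2 : List Char) (i : Nat) (hi : i < l1.length)
    (a : List (List Int)) (ha : InvA l1 l2 i 0 a) :
    ∀ j, j ≤ l2.length →
      InvA l1 l2 i j ((List.range j).foldl (fun a i2 => simA_step l1 l2 i i2 a) a) := by
  intro j
  induction j with
  | zero => intro _; simpa using ha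
  | succ j ih =>
    intro hj
    rw [List.range_succ, List.foldl_append]
    exact stepA_inv l1 l2 i j hi (by omega) _ (ih (by omega))

-- the invariant at the start/end of each outer iteration
def OutA (l1 l2 : List Char) (i : Nat) (a : List (List Int)) : Prop :=
  a.length = l1.length + 1 ∧
  a.getD i [] = rowB l1 l2 i ∧
  (∀ k, i < k → k ≤ l1.length → a.getD k [] = List.replicate (l2.length + 1) 0)

lemma outerA_fold (l1 l2 : List Char) :
    ∀ i, i ≤ l1.length →
      OutA l1 l2 i ((List.range i).foldl
        (fun a i1 => (List.range l2.length).foldl (fun a i2 => simA_step l1 l2 i1 i2 a) a)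
        (List.replicate (l1.length + 1) (List.replicate (l2.length + 1) (0 : Int)))) := by
  intro i
  induction i with
  | zero =>
    intro _
    refine ⟨by simp, ?_, ?_⟩
    · simp [rowB, List.getD]
    · intro k _ hk'; simp [List.getD, Nat.lt_succ_of_le hk']
  | succ i ih =>
    intro hi
    obtain ⟨hlen, hrow, hzero⟩ := ih (by omega)
    rw [List.range_succ, List.foldl_append, List.foldl_cons, List.foldl_nil]
    set A := (List.range i).foldl
      (fun a i1 => (List.range l2.length).foldl (fun a i2 => simA_step l1 l2 i1 i2 a) a)
      (List.replicate (l1.length + 1) (List.replicate (l2.length + 1) (0 : Int))) with hA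
    have h0 : InvA l1 l2 i 0 A := by
      refine ⟨hlen, ?_, ?_, ?_⟩
      · intro c _; rw [hrow]
      · rw [hzero (i + 1) (by omega) (by omega)]
        simp [prefB, List.replicate_succ]
      · intro k hk hk'; exact hzero k (by omega) hk'
    obtain ⟨hlen', _, hnext', hzero'⟩ := innerA_fold l1 l2 i (by omega) A h0 l2.length (le_refl _)
    refine ⟨hlen', ?_, ?_⟩
    · rw [hnext']; simp [rowB]
    · intro k hk hk'; exact hzero' k hk hk'

lemma simA_eq_rowB (l1 l2 : List Char) :
    (((List.range l1.length).foldl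
        (fun a i1 => (List.range l2.length).foldl (fun a i2 => simA_step l1 l2 i1 i2 a) a)
        (List.replicate (l1.length + 1) (List.replicate (l2.length + 1) (0 : Int)))).getD
        l1.length []).getD l2.length 0 = (rowB l1 l2 l1.length).getD l2.length 0 := by
  obtain ⟨_, hrow, _⟩ := outerA_fold l1 l2 l1.length (le_refl _)
  rw [hrow]

lemma pv_getD_concat (xs : List Int) (y : Int) (c : Nat) (h : c = xs.length) :
    (xs ++ [y]).getD c 0 = y := by
  subst h
  simp [List.getD]

-- rowB computes gpure cell by cell
lemma prefB_getD_gpure (l1 l2 : List Char) (i : Nat) (prev : List Int)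
    (hprev : ∀ c, c ≤ l2.length → prev.getD c 0 = gpure l1 l2 i c) :
    ∀ j', j' ≤ l2.length → ∀ c, c ≤ j' →
      (prefB l1 l2 i prev j').getD c 0 = gpure l1 l2 (i + 1) c := by
  intro j'
  induction j' with
  | zero =>
    intro _ c hc
    interval_cases c
    simp [prefB, gpure]
  | succ j' ih =>
    intro hj' c hc
    rw [prefB_succ]
    rcases Nat.lt_or_ge c (j' + 1) with hlt | hge
    · unfold bStep
      rw [pv_getD_append_left _ _ _ (by rw [prefB_length]; omega)]
      exact ih (by omega) c (by omega)
    · have hcv : c = j' + 1 := by omega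
      subst hcv
      unfold bStep
      have hlen := prefB_length l1 l2 i prev j'
      rw [pv_getD_concat _ _ _ (by omega), hprev j' (by omega), hprev (j' + 1) (by omega),
        ih (by omega) j' (by omega)]
      show max (gpure l1 l2 i j' + wB l1 l2 i j')
          (max (gpure l1 l2 (i + 1) j') (gpure l1 l2 i (j' + 1))) = _
      rw [gpure]
      rw [max_comm (gpure l1 l2 (i + 1) j') (gpure l1 l2 i (j' + 1))]
  
lemma rowB_eq_gpure (l1 l2 : List Char) :
    ∀ i j, j ≤ l2.length → (rowB l1 l2 i).getD j 0 = gpure l1 l2 i j := by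
  intro i
  induction i with
  | zero =>
    intro j hj
    rw [rowB, gpure]
    simp [List.getD, Nat.lt_succ_of_le hj]
  | succ i ih =>
    intro j hj
    rw [rowB]
    exact prefB_getD_gpure l1 l2 i (rowB l1 l2 i) ih l2.length (le_refl _) j hj

-- B side: the memo is sound, hence fB computes gpure
def SoundM (l1 l2 : List Char) (memo : List (List (Option Int))) : Prop :=
  ∀ a b v, pvGetM memo a b = some v → v = gpure l1 l2 a b

lemma pvGetM_setM (M : List (List (Option Int))) (x y : Nat) (v : Int) (a b : Nat) (w : Int)
    (h : pvGetM (pvSetM M x y v) a b = some w) :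
    (a = x ∧ b = y ∧ w = v) ∨ pvGetM M a b = some w := by
  simp only [pvGetM, pvSetM] at h ⊢
  by_cases hax : a = x
  · subst hax
    by_cases hx : a < M.length
    · rw [pv_getD_set_self _ _ _ _ hx] at h
      by_cases hby : b = y
      · subst hby
        by_cases hy : b < (M.getD a []).length
        · rw [pv_getD_set_self _ _ _ _ hy] at h
          exact Or.inl ⟨rfl, rfl, by injection h; omega⟩
        · rw [List.set_eq_of_length_le (by omega)] at h
          exact Or.inr h
      · rw [pv_getD_set_ne _ _ _ _ _ hby] at h
        exact Or.inr h
    · rw [List.set_eq_of_length_le (by omega)] at h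
      exact Or.inr h
  · rw [pv_getD_set_ne _ _ _ _ _ hax] at h
    exact Or.inr h

lemma fB_correct (l1 l2 : List Char) :
    ∀ n i j memo, i + j ≤ n → SoundM l1 l2 memo →
      (fB l1 l2 i j memo).1 = gpure l1 l2 i j ∧ SoundM l1 l2 (fB l1 l2 i j memo).2 := by
  intro n
  induction n with
  | zero =>
    intro i j memo hn hs
    have hi : i = 0 := by omega
    subst hi
    exact ⟨by rw [fB, gpure], by rw [fB]; exact hs⟩
  | succ n ih =>
    intro i j memo hn hs
    match i, j with
    | 0, j => exact ⟨by rw [fB, gpure], by rw [fB]; exact hs⟩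
    | i + 1, 0 => exact ⟨by rw [fB, gpure], by rw [fB]; exact hs⟩
    | i + 1, j + 1 =>
      rw [fB]
      cases hmem : pvGetM memo (i + 1) (j + 1) with
      | some v =>
        exact ⟨hs (i + 1) (j + 1) v hmem, hs⟩
      | none =>
        simp only []
        obtain ⟨hd, hsd⟩ := ih i j memo (by omega) hs
        obtain ⟨hu, hsu⟩ := ih i (j + 1) _ (by omega) hsd
        obtain ⟨hl, hsl⟩ := ih (i + 1) j _ (by omega) hsu
        have hval : max ((fB l1 l2 i j memo).1 + wB l1 l2 i j)
            (max ((fB l1 l2 i (j + 1) (fB l1 l2 i j memo).2).1)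
              ((fB l1 l2 (i + 1) j (fB l1 l2 i (j + 1) (fB l1 l2 i j memo).2).2).1))
            = gpure l1 l2 (i + 1) (j + 1) := by
          rw [hd, hu, hl, gpure]
        constructor
        · exact hval
        · intro a b w hw
          rcases pvGetM_setM _ _ _ _ _ _ _ hw with ⟨ha, hb, hwv⟩ | hold
          · subst ha; subst hb; rw [hwv, hval]
          · exact hsl a b w hold

lemma soundM_init (l1 l2 : List Char) (n m : Nat) :
    SoundM l1 l2 (List.replicate n (List.replicate m (none : Option Int))) := by
  intro a b v h
  unfold pvGetM at h
  rcases Nat.lt_or_ge a n with ha | ha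
  · rcases Nat.lt_or_ge b m with hb | hb
    · simp [List.getD, ha, hb] at h
    · simp [List.getD, ha, Nat.not_lt.mpr hb] at h
  · simp [List.getD, Nat.not_lt.mpr ha] at h

-- ===== VERDICT (by name: the statement is the Claim_ definition above) =====
theorem similarity_with_penalty_spec : Claim_equal_similarity_with_penalty := by
  intro s1 s2 _
  show similarity_with_penalty s1 s2 = similarity_with_penalty_alt s1 s2
  simp only [similarity_with_penalty, similarity_with_penalty_alt, pvGet2]
  rw [simA_eq_rowB, rowB_eq_gpure s1.toList s2.toList _ _ (le_refl _)]
  exact ((fB_correct s1.toList s2.toList (s1.toList.length + s2.toList.length)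
    s1.toList.length s2.toList.length _ (le_refl _)
    (soundM_init s1.toList s2.toList _ _)).1).symm
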